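-- pv_equiv track=rewrite | github.com/bitplorer/valio | valio/logger/color_format.py | soft_wrap
-- ===== SOURCE A (Python) =====
-- from typing import IO, List, Optional, Tuple
--
-- def split_words(msg: str) -> List[str]:
--     """Split line of text into words (but not within quoted groups)."""
--     next_word = ""
--     res = []  # type: List[str]
--     allow_break = True
--     for c in msg:
--         if c == " " and allow_break:
--             res.append(next_word)
--             next_word = ""
--             continue
--         if c == '"':
--             allow_break = not allow_break
--         next_word += c
--     res.append(next_word)
--     return res
--
-- def soft_wrap(msg: str, max_len: int, first_offset: int, num_indent: int = 0) -> str: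
--     """Wrap a long error message into few lines.
--
--     Breaks will only happen between words, and never inside a quoted group
--     (to avoid breaking types such as "Union[int, str]"). The 'first_offset' is
--     the width before the start of first line.
--
--     Pad every next line with 'num_indent' spaces. Every line will be at most 'max_len'
--     characters, except if it is a single word or quoted group.
--
--     For example:
--                first_offset
--         ------------------------
--         path/to/file: error: 58: Some very long error message
--             that needs to be split in separate lines.
--             "Long[Type, Names]" are never split.
--         ^^^^--------------------------------------------------
--         num_indent           max_len
--     """
--     words = split_words(msg)
--     next_line = words.pop(0)
--     lines = []  # type: List[str]
--     while words:
--         next_word = words.pop(0)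
--         max_line_len = max_len - num_indent if lines else max_len - first_offset
--         # Add 1 to account for space between words.
--         if len(next_line) + len(next_word) + 1 <= max_line_len:
--             next_line += " " + next_word
--         else:
--             lines.append(next_line)
--             next_line = next_word
--     lines.append(next_line)
--     padding = "\n" + " " * num_indent
--     return padding.join(lines)
-- ===== SOURCE B (Python) =====
-- def soft_wrap(msg: str, max_len: int, first_offset: int, num_indent: int = 0) -> str:
--     """One-pass wrap: scan characters once, flushing words into lines greedily."""
--     def flush(line, lines, word):
--         # finalize 'word' into the current layout
--         if line is None:
--             return word, lines
--         limit = max_len - num_indent if lines else max_len - first_offset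
--         if len(line) + len(word) + 1 <= limit:
--             return line + " " + word, lines
--         lines.append(line)
--         return word, lines
--
--     allow_break = True
--     word = ""
--     line = None
--     lines = []
--     for c in msg:
--         if c == " " and allow_break:
--             line, lines = flush(line, lines, word)
--             word = ""
--         else:
--             if c == '"':
--                 allow_break = not allow_break
--             word += c
--     line, lines = flush(line, lines, word)
--     lines.append(line)
--     return ("\n" + " " * num_indent).join(lines)
-- ===== Notes on version B (the rewrite author's own statement) =====
-- stated objective: simpler
-- what changed: Fused A's two passes (split_words building a word list, then a greedy while-loop over that list) into a single character scan that flushes each completed word into the current line/lines on the fly.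
import Mathlib
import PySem

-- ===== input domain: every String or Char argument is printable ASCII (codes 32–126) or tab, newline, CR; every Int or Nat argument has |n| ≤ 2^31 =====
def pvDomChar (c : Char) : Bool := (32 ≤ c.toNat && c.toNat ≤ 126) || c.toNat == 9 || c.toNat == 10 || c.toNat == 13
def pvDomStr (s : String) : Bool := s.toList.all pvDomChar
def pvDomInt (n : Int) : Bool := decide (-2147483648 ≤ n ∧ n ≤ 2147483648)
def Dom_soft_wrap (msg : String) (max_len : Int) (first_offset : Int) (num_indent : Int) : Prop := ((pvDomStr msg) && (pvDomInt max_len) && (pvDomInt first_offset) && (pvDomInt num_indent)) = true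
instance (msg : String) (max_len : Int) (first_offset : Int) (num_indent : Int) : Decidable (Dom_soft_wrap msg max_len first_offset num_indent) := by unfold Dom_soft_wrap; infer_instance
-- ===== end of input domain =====

-- B fuses A's two passes (split_words, then a greedy while-loop over the word list)
-- into one character scan that flushes words into lines as they complete (objective: simpler, one pass).

-- ===== PORT A =====
-- split_words' character loop: state (next_word, res, allow_break)
def swStep (st : List Char × List (List Char) × Bool) (c : Char) :
    List Char × List (List Char) × Bool :=
  if c = ' ' ∧ st.2.2 = true then ([], st.2.1 ++ [st.1], st.2.2)
  else if c = '"' then (st.1 ++ [c], st.2.1, !st.2.2)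
  else (st.1 ++ [c], st.2.1, st.2.2)

def split_words (msg : List Char) : List (List Char) :=
  let st := msg.foldl swStep ([], [], true)
  st.2.1 ++ [st.1]

-- the while-loop body over the remaining words: state (next_line, lines)
def wrapStep (max_len first_offset num_indent : Int)
    (st : List Char × List (List Char)) (w : List Char) :
    List Char × List (List Char) :=
  let max_line_len := if st.2 ≠ [] then max_len - num_indent else max_len - first_offset
  if (st.1.length : Int) + (w.length : Int) + 1 ≤ max_line_len then
    (st.1 ++ ' ' :: w, st.2)
  else (w, st.2 ++ [st.1])

def soft_wrap (msg : String) (max_len : Int) (first_offset : Int) (num_indent : Int) : String :=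
  match split_words msg.toList with
  | [] => ""  -- unreachable: split_words always returns a nonempty list
  | w0 :: ws =>
    let st := ws.foldl (wrapStep max_len first_offset num_indent) (w0, [])
    String.ofList (List.intercalate ('\n' :: List.replicate num_indent.toNat ' ') (st.2 ++ [st.1]))

-- ===== PORT B =====
-- flush a finished word into the layout (line = none means no word finished yet)
def flushB (max_len first_offset num_indent : Int)
    (line : Option (List Char)) (lines : List (List Char)) (word : List Char) :
    List Char × List (List Char) :=
  match line with
  | none => (word, lines)
  | some l =>
    let limit := if lines ≠ [] then max_len - num_indent else max_len - first_offset
    if (l.length : Int) + (word.length : Int) + 1 ≤ limit then (l ++ ' ' :: word, lines)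
    else (word, lines ++ [l])

-- the single character scan: state (allow_break, word, line, lines)
def altStep (max_len first_offset num_indent : Int)
    (st : Bool × List Char × Option (List Char) × List (List Char)) (c : Char) :
    Bool × List Char × Option (List Char) × List (List Char) :=
  if c = ' ' ∧ st.1 = true then
    let p := flushB max_len first_offset num_indent st.2.2.1 st.2.2.2 st.2.1
    (st.1, [], some p.1, p.2)
  else ((if c = '"' then !st.1 else st.1), st.2.1 ++ [c], st.2.2.1, st.2.2.2)

def soft_wrap_alt (msg : String) (max_len : Int) (first_offset : Int) (num_indent : Int) : String :=
  let st := msg.toList.foldl (altStep max_len first_offset num_indent) (true, [], none, [])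
  let p := flushB max_len first_offset num_indent st.2.2.1 st.2.2.2 st.2.1
  String.ofList (List.intercalate ('\n' :: List.replicate num_indent.toNat ' ') (p.2 ++ [p.1]))

-- ===== PRECONDITION & SPEC =====
def Spec_soft_wrap (msg : String) (max_len : Int) (first_offset : Int) (num_indent : Int) (out : String) : Prop := out = soft_wrap_alt msg max_len first_offset num_indent
instance (msg : String) (max_len : Int) (first_offset : Int) (num_indent : Int) (out : String) : Decidable (Spec_soft_wrap msg max_len first_offset num_indent out) := by unfold Spec_soft_wrap; infer_instance

-- ===== CLAIM (what is proved, stated in full; the proofs are below) =====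
def Claim_equal_soft_wrap : Prop := ∀ (msg : String) (max_len : Int) (first_offset : Int) (num_indent : Int), Dom_soft_wrap msg max_len first_offset num_indent → Spec_soft_wrap msg max_len first_offset num_indent (soft_wrap msg max_len first_offset num_indent)

-- ===== LEMMAS AND PROOFS =====

-- feeding a finished word into the layout, as a fold step
def gStep (max_len first_offset num_indent : Int)
    (p : Option (List Char) × List (List Char)) (w : List Char) :
    Option (List Char) × List (List Char) :=
  let q := flushB max_len first_offset num_indent p.1 p.2 w
  (some q.1, q.2)

-- the fused scan equals the split-words scan with finished words folded through gStep
theorem fuse (M F N : Int) (cs : List Char) :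
    ∀ (ab : Bool) (nw : List Char) (res : List (List Char))
      (p : Option (List Char) × List (List Char)),
    cs.foldl (altStep M F N) (ab, nw, (res.foldl (gStep M F N) p).1, (res.foldl (gStep M F N) p).2)
      = (let s := cs.foldl swStep (nw, res, ab)
         (s.2.2, s.1, (s.2.1.foldl (gStep M F N) p).1, (s.2.1.foldl (gStep M F N) p).2)) := by
  induction cs with
  | nil => intro ab nw res p; rfl
  | cons c cs ih =>
    intro ab nw res p
    simp only [List.foldl_cons]
    by_cases h : c = ' ' ∧ ab = true
    · have h1 : altStep M F N (ab, nw, (res.foldl (gStep M F N) p).1, (res.foldl (gStep M F N) p).2) c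
          = (ab, [], ((res ++ [nw]).foldl (gStep M F N) p).1, ((res ++ [nw]).foldl (gStep M F N) p).2) := by
        simp [altStep, h, gStep, List.foldl_append]
      have h2 : swStep (nw, res, ab) c = ([], res ++ [nw], ab) := by
        simp [swStep, h]
      rw [h1, h2]; exact ih ab [] (res ++ [nw]) p
    · have h1 : altStep M F N (ab, nw, (res.foldl (gStep M F N) p).1, (res.foldl (gStep M F N) p).2) c
          = ((if c = '"' then !ab else ab), nw ++ [c], (res.foldl (gStep M F N) p).1, (res.foldl (gStep M F N) p).2) := by
        simp [altStep, h]
      have h2 : swStep (nw, res, ab) c = (nw ++ [c], res, (if c = '"' then !ab else ab)) := by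
        by_cases hq : c = '"' <;> simp [swStep, h, hq]
      rw [h1, h2]; exact ih _ (nw ++ [c]) res p

-- folding gStep from a seeded line equals A's wrap loop
theorem g_wrap (M F N : Int) (ws : List (List Char)) :
    ∀ (l : List Char) (lines : List (List Char)),
    ws.foldl (gStep M F N) (some l, lines)
      = (let s := ws.foldl (wrapStep M F N) (l, lines)
         (some s.1, s.2)) := by
  induction ws with
  | nil => intro l lines; rfl
  | cons w ws ih =>
    intro l lines
    simp only [List.foldl_cons]
    have : gStep M F N (some l, lines) w
        = (some (wrapStep M F N (l, lines) w).1, (wrapStep M F N (l, lines) w).2) := by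
      simp [gStep, flushB, wrapStep]
    rw [this]
    exact ih _ _

theorem soft_wrap_eq (msg : String) (M F N : Int) :
    soft_wrap msg M F N = soft_wrap_alt msg M F N := by
  unfold soft_wrap soft_wrap_alt
  have hfuse := fuse M F N msg.toList true [] [] (none, [])
  simp only [List.foldl_nil] at hfuse
  rw [hfuse]
  unfold split_words
  obtain ⟨nw, res, ab⟩ := msg.toList.foldl swStep ([], [], true)
  simp only
  rcases hres : res ++ [nw] with _ | ⟨w0, ws⟩
  · exact absurd hres (by simp)
  · -- the whole fold over res ++ [nw] through gStep equals A's wrap loop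
    have hfold : ((res ++ [nw]).foldl (gStep M F N) (none, []))
        = (some (ws.foldl (wrapStep M F N) (w0, [])).1,
           (ws.foldl (wrapStep M F N) (w0, [])).2) := by
      rw [hres, List.foldl_cons]
      have h0 : gStep M F N (none, []) w0 = (some w0, []) := by simp [gStep, flushB]
      rw [h0]; exact g_wrap M F N ws w0 []
    -- B's trailing flush IS the last gStep of that fold
    have h1 : ((res ++ [nw]).foldl (gStep M F N) (none, []))
        = (some ((flushB M F N ((res.foldl (gStep M F N) (none, [])).1)
            ((res.foldl (gStep M F N) (none, [])).2) nw).1),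
           (flushB M F N ((res.foldl (gStep M F N) (none, [])).1)
            ((res.foldl (gStep M F N) (none, [])).2) nw).2) := by
      simp [List.foldl_append, gStep]
    rw [hfold] at h1
    simp only
    obtain ⟨h1a, h1b⟩ := Prod.mk.injEq .. ▸ h1
    rw [Option.some.inj h1a, h1b]

-- ===== VERDICT (by name: the statement is the Claim_ definition above) =====
theorem soft_wrap_spec : Claim_equal_soft_wrap := by
  intro msg M F N _
  unfold Spec_soft_wrap
  exact soft_wrap_eq msg M F N
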